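-- pv_equiv track=rewrite | github.com/napari/docs | docs/_scripts/update_event_docs.py | merge_image_and_label_rows
-- ===== SOURCE A (Python) =====
-- from typing import Dict, List, Optional, Type
--
-- def merge_image_and_label_rows(rows: List[List[str]]):
--     """Merge events common to _ImageBase or IntensityVisualizationMixin."""
--     # find events that are common across both Image, Labels and Surface layers.
--     image_events = {r[1] for r in rows if r[0] == '`Image`'}
--     labels_events = {r[1] for r in rows if r[0] == '`Labels`'}
--     surface_events = {r[1] for r in rows if r[0] == '`Surface`'}
--     common_events = image_events & labels_events & surface_events
--     # common only to Image and Labels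
--     imagebase_events = (image_events & labels_events) - common_events
--
--     # drop duplicate Labels and/or Surface entries
--     rows = [
--         r
--         for r in rows
--         if not (r[0] in ['`Labels`', '`Surface`'] and r[1] in common_events)
--     ]
--     rows = [
--         r
--         for r in rows
--         if not (r[0] in ['`Labels`', '`Surface`'] and r[1] in imagebase_events)
--     ]
--
--     # modify the class name of the Image entries to mention Labels, Surface
--     rows = [
--         ['`Image`, `Labels`'] + r[1:]
--         if r[0] == '`Image`' and r[1] in imagebase_events
--         else r
--         for r in rows
--     ]
--     rows = [
--         ['`Image`, `Labels`, `Surface`'] + r[1:]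
--         if r[0] == '`Image`' and r[1] in common_events
--         else r
--         for r in rows
--     ]
--     return rows
-- ===== SOURCE B (Python) =====
-- def merge_image_and_label_rows(rows):
--     """Merge events common to _ImageBase or IntensityVisualizationMixin.
--
--     Instead of per-layer event sets and set intersections, build one dict
--     mapping each event name to a bitmask of which of the three layer types
--     carry it, then rewrite the table in a single traversal classifying each
--     row by bit arithmetic on its event's mask.
--     """
--     LAYER_BIT = {'`Image`': 1, '`Labels`': 2, '`Surface`': 4}
--     mask = {}
--     for r in rows:
--         b = LAYER_BIT.get(r[0])
--         if b is not None:
--             mask[r[1]] = mask.get(r[1], 0) | b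
--     out = []
--     for r in rows:
--         tag = r[0]
--         if tag in LAYER_BIT:
--             m = mask.get(r[1], 0)
--             if m & 3 == 3:  # event shared by Image and Labels (at least)
--                 if tag == '`Image`':
--                     label = ('`Image`, `Labels`, `Surface`' if m & 4
--                              else '`Image`, `Labels`')
--                     out.append([label] + r[1:])
--                 continue  # duplicate Labels/Surface rows are dropped
--         out.append(r)
--     return out
-- ===== Notes on version B (the rewrite author's own statement) =====
-- stated objective: alternative
-- what changed: Replaces A's three per-layer event sets with set intersections/difference and four sequential filter/map passes by one dict mapping each event to a bitmask of the layer types carrying it, then a single traversal that drops or relabels each row by bit arithmetic (m&3==3, m&4) on its event's mask.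
import Mathlib
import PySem

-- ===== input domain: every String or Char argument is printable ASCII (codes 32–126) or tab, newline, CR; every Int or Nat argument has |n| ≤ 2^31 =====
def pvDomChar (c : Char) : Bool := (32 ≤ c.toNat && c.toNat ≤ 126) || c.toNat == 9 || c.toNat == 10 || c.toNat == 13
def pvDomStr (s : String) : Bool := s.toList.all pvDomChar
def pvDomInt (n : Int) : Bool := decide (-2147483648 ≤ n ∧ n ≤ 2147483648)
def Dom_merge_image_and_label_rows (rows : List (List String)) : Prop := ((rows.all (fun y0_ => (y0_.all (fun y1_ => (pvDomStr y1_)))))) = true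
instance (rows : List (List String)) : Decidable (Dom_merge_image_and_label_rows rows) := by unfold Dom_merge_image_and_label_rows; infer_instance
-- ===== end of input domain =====

-- ===== PORT A =====
-- B replaces A's per-layer event sets + intersections + four passes by one event→layer-bitmask dict and a single classifying traversal (alternative).
-- helpers: r[0] / r[1] as total lookups (Pre_ guarantees the indices are in range wherever they are read)
def pvH (r : List String) : String := PySem.List.pyGetD r 0 ""
def pvE (r : List String) : String := PySem.List.pyGetD r 1 ""

def pvEvts (name : String) (rows : List (List String)) : PySem.Set String :=
  PySem.Set.ofList ((rows.filter (fun r => pvH r == name)).map pvE)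

def merge_image_and_label_rows (rows : List (List String)) : List (List String) :=
  let image_events := pvEvts "`Image`" rows
  let labels_events := pvEvts "`Labels`" rows
  let surface_events := pvEvts "`Surface`" rows
  let common_events := PySem.Set.inter (PySem.Set.inter image_events labels_events) surface_events
  let imagebase_events := PySem.Set.diff (PySem.Set.inter image_events labels_events) common_events
  let rows1 := rows.filter (fun r =>
    !((pvH r == "`Labels`" || pvH r == "`Surface`") && PySem.Set.contains common_events (pvE r)))
  let rows2 := rows1.filter (fun r =>
    !((pvH r == "`Labels`" || pvH r == "`Surface`") && PySem.Set.contains imagebase_events (pvE r)))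
  let rows3 := rows2.map (fun r =>
    if pvH r == "`Image`" && PySem.Set.contains imagebase_events (pvE r) then
      ["`Image`, `Labels`"] ++ PySem.List.slice r (some 1) none
    else r)
  let rows4 := rows3.map (fun r =>
    if pvH r == "`Image`" && PySem.Set.contains common_events (pvE r) then
      ["`Image`, `Labels`, `Surface`"] ++ PySem.List.slice r (some 1) none
    else r)
  rows4

-- ===== PORT B =====
-- LAYER_BIT = {'`Image`': 1, '`Labels`': 2, '`Surface`': 4}
def pvLayerBit : PySem.Dict String Int :=
  PySem.Dict.ofList [("`Image`", 1), ("`Labels`", 2), ("`Surface`", 4)]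

-- body of B's first loop: mask[r[1]] = mask.get(r[1], 0) | b   (when r[0] is a layer tag)
def pvMaskStep (d : PySem.Dict String Int) (r : List String) : PySem.Dict String Int :=
  match pvLayerBit.get? (pvH r) with
  | some b => d.insert (pvE r) (PySem.Int.bor (d.getD (pvE r) 0) b)
  | none => d

-- body of B's second loop: drop / relabel / keep, decided by bit arithmetic on the event's mask
def pvOutStep (mask : PySem.Dict String Int) (out : List (List String)) (r : List String) :
    List (List String) :=
  if pvLayerBit.contains (pvH r) then
    let m := mask.getD (pvE r) 0
    if PySem.Int.band m 3 == 3 then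
      if pvH r == "`Image`" then
        out ++ [[(if PySem.Int.band m 4 != 0 then "`Image`, `Labels`, `Surface`"
                  else "`Image`, `Labels`")] ++ PySem.List.slice r (some 1) none]
      else out
    else out ++ [r]
  else out ++ [r]

def merge_image_and_label_rows_alt (rows : List (List String)) : List (List String) :=
  let mask := rows.foldl pvMaskStep PySem.Dict.empty
  rows.foldl (pvOutStep mask) []

-- ===== PRECONDITION & SPEC =====
-- Pre_ excludes exactly the inputs on which Python A raises IndexError: an empty row
-- (r[0]) or a layer row with no event column (r[1]); B raises identically there.
def Pre_merge_image_and_label_rows (rows : List (List String)) : Prop :=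
  ∀ r ∈ rows, r ≠ [] ∧
    ((pvH r = "`Image`" ∨ pvH r = "`Labels`" ∨ pvH r = "`Surface`") → 2 ≤ r.length)
instance (rows : List (List String)) : Decidable (Pre_merge_image_and_label_rows rows) := by
  unfold Pre_merge_image_and_label_rows; infer_instance

def pvWitness_merge_image_and_label_rows : List (List String) :=
  [["`Image`", "a"], ["`Labels`", "a"], ["`Surface`", "a"], ["`Image`", "b"],
   ["`Labels`", "b"], ["`Points`", "a"]]

def Spec_merge_image_and_label_rows (rows : List (List String)) (out : List (List String)) : Prop := out = merge_image_and_label_rows_alt rows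
instance (rows : List (List String)) (out : List (List String)) : Decidable (Spec_merge_image_and_label_rows rows out) := by unfold Spec_merge_image_and_label_rows; infer_instance

-- ===== CLAIM (what is proved, stated in full; the proofs are below) =====
def Claim_equal_merge_image_and_label_rows : Prop := ∀ (rows : List (List String)), Dom_merge_image_and_label_rows rows → Pre_merge_image_and_label_rows rows → Spec_merge_image_and_label_rows rows (merge_image_and_label_rows rows)

-- ===== LEMMAS AND PROOFS =====

-- A's common_events / imagebase_events
def pvC (rows : List (List String)) : PySem.Set String :=
  PySem.Set.inter (PySem.Set.inter (pvEvts "`Image`" rows) (pvEvts "`Labels`" rows))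
    (pvEvts "`Surface`" rows)

def pvI (rows : List (List String)) : PySem.Set String :=
  PySem.Set.diff (PySem.Set.inter (pvEvts "`Image`" rows) (pvEvts "`Labels`" rows)) (pvC rows)

-- the bitmask B's dict holds for event e, expressed through A's three filtered event lists
def pvM (rows : List (List String)) (e : String) : Int :=
  (if e ∈ (rows.filter (fun r => pvH r == "`Image`")).map pvE then 1 else 0)
  + (if e ∈ (rows.filter (fun r => pvH r == "`Labels`")).map pvE then 2 else 0)
  + (if e ∈ (rows.filter (fun r => pvH r == "`Surface`")).map pvE then 4 else 0)

-- small propositional rewriters for the ((tag ∧ event) ∨ mem) conditions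
theorem pv_or_true {P Q : Prop} (hp : P) : ((P ∧ True) ∨ Q) = True :=
  eq_true (Or.inl ⟨hp, trivial⟩)
theorem pv_or_elim {P R Q : Prop} (h : ¬ P) : ((P ∧ R) ∨ Q) = Q :=
  propext (or_iff_right fun hh => h hh.1)
theorem pv_or_elim' {P Q : Prop} (h : ¬ P) : ((P ∧ True) ∨ Q) = Q :=
  propext (or_iff_right fun hh => h hh.1)
theorem pv_or_elim2 {P R Q : Prop} (h : ¬ R) : ((P ∧ R) ∨ Q) = Q :=
  propext (or_iff_right fun hh => h hh.2)
theorem pvNeOf {x a b : String} (h : x = a) (hne : ¬ a = b) : ¬ x = b :=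
  fun hh => hne (h.symm.trans hh)

theorem pvBit_eq (t : String) : pvLayerBit.get? t =
    if t = "`Image`" then some 1 else if t = "`Labels`" then some 2
    else if t = "`Surface`" then some 4 else none := by
  by_cases h1 : t = "`Image`"
  · subst h1; decide
  · by_cases h2 : t = "`Labels`"
    · subst h2; decide
    · by_cases h3 : t = "`Surface`"
      · subst h3; decide
      · simp [pvLayerBit, PySem.Dict.ofList, PySem.Dict.update, PySem.Dict.get?_insert,
          PySem.Dict.get?_empty, h1, h2, h3]

theorem pvH_cons (x : String) (l : List String) : pvH (x :: l) = x := by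
  simp [pvH, PySem.List.pyGetD, PySem.List.pyIdx?, PySem.List.pyGet?]

theorem pvMemApp (tag : String) (xs : List (List String)) (r : List String) (e : String) :
    (e ∈ (List.filter (fun r => pvH r == tag) (xs ++ [r])).map pvE)
    ↔ ((pvH r = tag ∧ e = pvE r) ∨ e ∈ (List.filter (fun r => pvH r == tag) xs).map pvE) := by
  by_cases h : pvH r = tag <;> simp [List.filter_append, h, or_comm]

theorem pvM_append (xs : List (List String)) (r : List String) (e : String) :
    pvM (xs ++ [r]) e =
      (if (pvH r = "`Image`" ∧ e = pvE r) ∨ e ∈ (List.filter (fun r => pvH r == "`Image`") xs).map pvE then 1 else 0)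
      + (if (pvH r = "`Labels`" ∧ e = pvE r) ∨ e ∈ (List.filter (fun r => pvH r == "`Labels`") xs).map pvE then 2 else 0)
      + (if (pvH r = "`Surface`" ∧ e = pvE r) ∨ e ∈ (List.filter (fun r => pvH r == "`Surface`") xs).map pvE then 4 else 0) := by
  unfold pvM
  rw [if_congr (pvMemApp "`Image`" xs r e) rfl rfl, if_congr (pvMemApp "`Labels`" xs r e) rfl rfl,
      if_congr (pvMemApp "`Surface`" xs r e) rfl rfl]

-- B's collecting fold holds, at every key, exactly the layer bitmask of the rows seen
theorem pvMask_spec (rows : List (List String)) :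
    ∀ e, (rows.foldl pvMaskStep PySem.Dict.empty).getD e 0 = pvM rows e := by
  induction rows using List.reverseRecOn with
  | nil => intro e; simp [pvM, PySem.Dict.getD_empty]
  | append_singleton xs r ih =>
    intro e
    rw [List.foldl_append, List.foldl_cons, List.foldl_nil]
    by_cases h1 : pvH r = "`Image`"
    · rw [show pvMaskStep (xs.foldl pvMaskStep PySem.Dict.empty) r
          = (xs.foldl pvMaskStep PySem.Dict.empty).insert (pvE r)
              (PySem.Int.bor ((xs.foldl pvMaskStep PySem.Dict.empty).getD (pvE r) 0) 1) by
        simp [pvMaskStep, pvBit_eq, h1]]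
      rw [PySem.Dict.getD_insert, ih, ih, pvM_append]
      by_cases he : e = pvE r
      · subst he
        rw [if_pos rfl]
        simp only [pvM, pv_or_true h1,
          pv_or_elim' (pvNeOf h1 (show ¬"`Image`" = "`Labels`" by decide)),
          pv_or_elim' (pvNeOf h1 (show ¬"`Image`" = "`Surface`" by decide)), if_true]
        split_ifs <;> decide
      · rw [if_neg he]
        simp only [pvM, pv_or_elim2 he]
    · by_cases h2 : pvH r = "`Labels`"
      · rw [show pvMaskStep (xs.foldl pvMaskStep PySem.Dict.empty) r
            = (xs.foldl pvMaskStep PySem.Dict.empty).insert (pvE r)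
                (PySem.Int.bor ((xs.foldl pvMaskStep PySem.Dict.empty).getD (pvE r) 0) 2) by
          simp [pvMaskStep, pvBit_eq, h2]]
        rw [PySem.Dict.getD_insert, ih, ih, pvM_append]
        by_cases he : e = pvE r
        · subst he
          rw [if_pos rfl]
          simp only [pvM, pv_or_true h2,
            pv_or_elim' (pvNeOf h2 (show ¬"`Labels`" = "`Image`" by decide)),
            pv_or_elim' (pvNeOf h2 (show ¬"`Labels`" = "`Surface`" by decide)), if_true]
          split_ifs <;> decide
        · rw [if_neg he]
          simp only [pvM, pv_or_elim2 he]
      · by_cases h3 : pvH r = "`Surface`"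
        · rw [show pvMaskStep (xs.foldl pvMaskStep PySem.Dict.empty) r
              = (xs.foldl pvMaskStep PySem.Dict.empty).insert (pvE r)
                  (PySem.Int.bor ((xs.foldl pvMaskStep PySem.Dict.empty).getD (pvE r) 0) 4) by
            simp [pvMaskStep, pvBit_eq, h3]]
          rw [PySem.Dict.getD_insert, ih, ih, pvM_append]
          by_cases he : e = pvE r
          · subst he
            rw [if_pos rfl]
            simp only [pvM, pv_or_true h3,
              pv_or_elim' (pvNeOf h3 (show ¬"`Surface`" = "`Image`" by decide)),
              pv_or_elim' (pvNeOf h3 (show ¬"`Surface`" = "`Labels`" by decide)), if_true]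
            split_ifs <;> decide
          · rw [if_neg he]
            simp only [pvM, pv_or_elim2 he]
        · rw [show pvMaskStep (xs.foldl pvMaskStep PySem.Dict.empty) r
              = xs.foldl pvMaskStep PySem.Dict.empty by
            simp [pvMaskStep, pvBit_eq, h1, h2, h3]]
          rw [ih, pvM_append]
          simp only [pvM, pv_or_elim h1, pv_or_elim h2, pv_or_elim h3]

-- membership in A's sets, through the filtered event lists
theorem pvC_mem (rows : List (List String)) (e : String) :
    e ∈ pvC rows ↔
      e ∈ (rows.filter (fun r => pvH r == "`Image`")).map pvE ∧
      e ∈ (rows.filter (fun r => pvH r == "`Labels`")).map pvE ∧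
      e ∈ (rows.filter (fun r => pvH r == "`Surface`")).map pvE := by
  simp [pvC, pvEvts, PySem.Set.mem_inter, PySem.Set.mem_ofList, and_assoc]

theorem pvI_mem (rows : List (List String)) (e : String) :
    e ∈ pvI rows ↔
      e ∈ (rows.filter (fun r => pvH r == "`Image`")).map pvE ∧
      e ∈ (rows.filter (fun r => pvH r == "`Labels`")).map pvE ∧
      ¬ e ∈ (rows.filter (fun r => pvH r == "`Surface`")).map pvE := by
  simp only [pvI, PySem.Set.mem_diff, PySem.Set.mem_inter, pvEvts, PySem.Set.mem_ofList, pvC_mem]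
  tauto

-- A's set tests, as bit tests on B's mask
theorem pvC_band (rows : List (List String)) (e : String) :
    PySem.Set.contains (pvC rows) e
      = (PySem.Int.band (pvM rows e) 3 == 3 && PySem.Int.band (pvM rows e) 4 != 0) := by
  have hCc : PySem.Set.contains (pvC rows) e = decide (e ∈ pvC rows) := by
    by_cases h : e ∈ pvC rows <;> simp [h]
  rw [hCc]
  by_cases ha : e ∈ (rows.filter (fun r => pvH r == "`Image`")).map pvE <;>
  by_cases hb : e ∈ (rows.filter (fun r => pvH r == "`Labels`")).map pvE <;>
  by_cases hc : e ∈ (rows.filter (fun r => pvH r == "`Surface`")).map pvE <;>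
  simp only [pvM, pvC_mem, ha, hb, hc, if_true, if_false] <;> decide

theorem pvI_band (rows : List (List String)) (e : String) :
    PySem.Set.contains (pvI rows) e
      = (PySem.Int.band (pvM rows e) 3 == 3 && !(PySem.Int.band (pvM rows e) 4 != 0)) := by
  have hIc : PySem.Set.contains (pvI rows) e = decide (e ∈ pvI rows) := by
    by_cases h : e ∈ pvI rows <;> simp [h]
  rw [hIc]
  by_cases ha : e ∈ (rows.filter (fun r => pvH r == "`Image`")).map pvE <;>
  by_cases hb : e ∈ (rows.filter (fun r => pvH r == "`Labels`")).map pvE <;>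
  by_cases hc : e ∈ (rows.filter (fun r => pvH r == "`Surface`")).map pvE <;>
  simp only [pvM, pvI_mem, ha, hb, hc, if_true, if_false] <;> decide

-- A's four sequential passes (C = common_events, I = imagebase_events)
def pvStage (C I : PySem.Set String) (rows : List (List String)) : List (List String) :=
  (((rows.filter (fun r =>
      !((pvH r == "`Labels`" || pvH r == "`Surface`") && PySem.Set.contains C (pvE r)))).filter (fun r =>
      !((pvH r == "`Labels`" || pvH r == "`Surface`") && PySem.Set.contains I (pvE r)))).map (fun r =>
      if pvH r == "`Image`" && PySem.Set.contains I (pvE r) then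
        ["`Image`, `Labels`"] ++ PySem.List.slice r (some 1) none
      else r)).map (fun r =>
      if pvH r == "`Image`" && PySem.Set.contains C (pvE r) then
        ["`Image`, `Labels`, `Surface`"] ++ PySem.List.slice r (some 1) none
      else r)

theorem portA_eq (rows : List (List String)) :
    merge_image_and_label_rows rows = pvStage (pvC rows) (pvI rows) rows := rfl

theorem pvCI_disj (rows : List (List String)) : ∀ x, x ∈ pvC rows → x ∉ pvI rows := by
  intro x hx hxI
  rw [pvI, PySem.Set.mem_diff] at hxI
  exact hxI.2 hx

theorem pvStage_cons_eq (C I : PySem.Set String)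
    (hdisj : ∀ x, x ∈ C → x ∉ I)
    (r : List String) (rs : List (List String)) :
    pvStage C I (r :: rs) =
      (if (pvH r == "`Labels`" || pvH r == "`Surface`") &&
            (PySem.Set.contains C (pvE r) || PySem.Set.contains I (pvE r)) then []
       else if pvH r == "`Image`" && PySem.Set.contains C (pvE r) then
         [["`Image`, `Labels`, `Surface`"] ++ PySem.List.slice r (some 1) none]
       else if pvH r == "`Image`" && PySem.Set.contains I (pvE r) then
         [["`Image`, `Labels`"] ++ PySem.List.slice r (some 1) none]
       else [r]) ++ pvStage C I rs := by
  by_cases hC : pvE r ∈ C <;>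
  by_cases hI : pvE r ∈ I <;>
  by_cases h2 : pvH r = "`Labels`" <;>
  by_cases h3 : pvH r = "`Surface`" <;>
  by_cases hM : pvH r = "`Image`" <;>
  first
  | exact absurd hI (hdisj _ hC)
  | (exfalso; first
      | (rw [hM] at h2; exact absurd h2 (by decide))
      | (rw [hM] at h3; exact absurd h3 (by decide))
      | (rw [h2] at h3; exact absurd h3 (by decide)))
  | simp [pvStage, hC, hI, h2, h3, hM, pvH_cons]

-- one step of B's output loop is the corresponding 4-way case of A's staged passes
theorem pvOutStep_eq (rows : List (List String)) (out : List (List String)) (r : List String) :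
    pvOutStep (rows.foldl pvMaskStep PySem.Dict.empty) out r =
      out ++
      (if (pvH r == "`Labels`" || pvH r == "`Surface`") &&
            (PySem.Set.contains (pvC rows) (pvE r) || PySem.Set.contains (pvI rows) (pvE r)) then []
       else if pvH r == "`Image`" && PySem.Set.contains (pvC rows) (pvE r) then
         [["`Image`, `Labels`, `Surface`"] ++ PySem.List.slice r (some 1) none]
       else if pvH r == "`Image`" && PySem.Set.contains (pvI rows) (pvE r) then
         [["`Image`, `Labels`"] ++ PySem.List.slice r (some 1) none]
       else [r]) := by
  have hm := pvMask_spec rows (pvE r)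
  have hCiff : (pvE r ∈ pvC rows)
      ↔ ((PySem.Int.band (pvM rows (pvE r)) 3 == 3) = true
         ∧ (PySem.Int.band (pvM rows (pvE r)) 4 != 0) = true) := by
    rw [← PySem.Set.contains_iff, pvC_band]; simp [Bool.and_eq_true]
  have hIiff : (pvE r ∈ pvI rows)
      ↔ ((PySem.Int.band (pvM rows (pvE r)) 3 == 3) = true
         ∧ ¬ (PySem.Int.band (pvM rows (pvE r)) 4 != 0) = true) := by
    rw [← PySem.Set.contains_iff, pvI_band]; simp [Bool.and_eq_true]
  by_cases h1 : pvH r = "`Image`"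
  · have hcont : pvLayerBit.contains "`Image`" = true := by decide
    by_cases hs : (PySem.Int.band (pvM rows (pvE r)) 3 == 3) = true <;>
    by_cases h4 : (PySem.Int.band (pvM rows (pvE r)) 4 != 0) = true <;>
    simp [pvOutStep, hm, hcont, hCiff, hIiff, hs, h4, h1]
  · by_cases h2 : pvH r = "`Labels`"
    · have hcont : pvLayerBit.contains "`Labels`" = true := by decide
      by_cases hs : (PySem.Int.band (pvM rows (pvE r)) 3 == 3) = true <;>
      by_cases h4 : (PySem.Int.band (pvM rows (pvE r)) 4 != 0) = true <;>
      simp [pvOutStep, hm, hcont, hCiff, hIiff, hs, h4, h2]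
    · by_cases h3 : pvH r = "`Surface`"
      · have hcont : pvLayerBit.contains "`Surface`" = true := by decide
        by_cases hs : (PySem.Int.band (pvM rows (pvE r)) 3 == 3) = true <;>
        by_cases h4 : (PySem.Int.band (pvM rows (pvE r)) 4 != 0) = true <;>
        simp [pvOutStep, hm, hcont, hCiff, hIiff, hs, h4, h3]
      · have hcont : pvLayerBit.contains (pvH r) = false := by
          rw [PySem.Dict.contains_eq_isSome_get?, pvBit_eq]
          simp [h1, h2, h3]
        simp [pvOutStep, hcont, h1, h2, h3]

-- B's output fold, from any accumulator, is A's staged result appended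
theorem pvFold_eq (rows : List (List String)) :
    ∀ (rs acc : List (List String)),
      rs.foldl (pvOutStep (rows.foldl pvMaskStep PySem.Dict.empty)) acc
        = acc ++ pvStage (pvC rows) (pvI rows) rs := by
  intro rs
  induction rs with
  | nil => intro acc; simp [pvStage]
  | cons r rs ih =>
    intro acc
    rw [List.foldl_cons, pvOutStep_eq rows acc r, ih,
      pvStage_cons_eq (pvC rows) (pvI rows) (pvCI_disj rows) r rs, List.append_assoc]

-- ===== VERDICT (by name: the statement is the Claim_ definition above) =====
theorem merge_image_and_label_rows_spec : Claim_equal_merge_image_and_label_rows := by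
  intro rows _ _
  unfold Spec_merge_image_and_label_rows
  rw [portA_eq]
  show pvStage (pvC rows) (pvI rows) rows
      = rows.foldl (pvOutStep (rows.foldl pvMaskStep PySem.Dict.empty)) []
  rw [pvFold_eq rows rows []]
  simp
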